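-- pv_equiv track=rewrite | github.com/rwang97/ee225-project | standard_aug/augment.py | find_save_path
-- ===== SOURCE A (Python) =====
-- def find_save_path(path, last_name='0'):
--     path = str(path).split('/')
--     save_path = []
--     for child in reversed(path):
--         if child == last_name:
--             break
--         save_path.append(child)
--
--     save_path = reversed(save_path)
--     save_path = '/'.join(save_path)
--
--     return save_path
-- ===== SOURCE B (Python) =====
-- def find_save_path(path, last_name='0'):
--     parts = str(path).split('/')
--     last = -1
--     for i, c in enumerate(parts):
--         if c == last_name:
--             last = i
--     return '/'.join(parts[last + 1:])
-- ===== Notes on version B (the rewrite author's own statement) =====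
-- stated objective: simpler
-- what changed: Replaces A's backward accumulate-then-reverse loop with a forward scan recording the index of the last matching component followed by a single slice.
import Mathlib
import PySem

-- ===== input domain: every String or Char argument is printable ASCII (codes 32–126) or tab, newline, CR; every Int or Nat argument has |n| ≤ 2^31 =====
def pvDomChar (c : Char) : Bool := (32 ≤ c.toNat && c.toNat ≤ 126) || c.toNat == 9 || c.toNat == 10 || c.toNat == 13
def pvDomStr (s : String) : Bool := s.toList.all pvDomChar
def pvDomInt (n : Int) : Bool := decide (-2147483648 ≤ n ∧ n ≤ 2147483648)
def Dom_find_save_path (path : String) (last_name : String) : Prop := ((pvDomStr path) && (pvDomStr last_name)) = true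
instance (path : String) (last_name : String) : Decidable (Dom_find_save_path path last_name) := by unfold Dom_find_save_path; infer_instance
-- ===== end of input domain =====

-- B replaces A's backward accumulate-then-reverse loop with a forward last-match-index scan plus one slice (objective: simpler).

-- ===== PORT A =====
-- the 'for child in reversed(path): if child == last_name: break; save_path.append(child)' loop
def pvLoopA (last_name : String) (acc : List String) : List String → List String
  | [] => acc
  | c :: rest => if c = last_name then acc else pvLoopA last_name (acc ++ [c]) rest

def find_save_path (path : String) (last_name : String) : String :=
  let parts := (PySem.Str.split? path "/").getD []
  let save_path := pvLoopA last_name [] parts.reverse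
  PySem.Str.join "/" save_path.reverse

-- ===== PORT B =====
def find_save_path_alt (path : String) (last_name : String) : String :=
  let parts := (PySem.Str.split? path "/").getD []
  let last := (PySem.List.enumerate parts 0).foldl
    (fun last ic => if ic.2 = last_name then ic.1 else last) (-1 : Int)
  PySem.Str.join "/" (PySem.List.slice parts (some (last + 1)) none)

-- ===== PRECONDITION & SPEC =====
def Spec_find_save_path (path : String) (last_name : String) (out : String) : Prop := out = find_save_path_alt path last_name
instance (path : String) (last_name : String) (out : String) : Decidable (Spec_find_save_path path last_name out) := by unfold Spec_find_save_path; infer_instance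

-- ===== CLAIM (what is proved, stated in full; the proofs are below) =====
def Claim_equal_find_save_path : Prop := ∀ (path : String) (last_name : String), Dom_find_save_path path last_name → Spec_find_save_path path last_name (find_save_path path last_name)

-- ===== LEMMAS AND PROOFS =====

def pvF (ln : String) (l : List String) : Int :=
  (PySem.List.enumerate l 0).foldl (fun last ic => if ic.2 = ln then ic.1 else last) (-1 : Int)

lemma pvF_snoc (ln x : String) (xs : List String) :
    pvF ln (xs ++ [x]) = if x = ln then (xs.length : Int) else pvF ln xs := by
  unfold pvF
  rw [PySem.List.enumerate_append]
  simp [PySem.List.enumerate_cons, PySem.List.enumerate_nil]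

lemma pvF_bound (ln : String) (l : List String) :
    -1 ≤ pvF ln l ∧ pvF ln l < (l.length : Int) := by
  induction l using List.reverseRecOn with
  | nil => simp [pvF, PySem.List.enumerate_nil]
  | append_singleton xs x ih =>
    rw [pvF_snoc]
    split_ifs with h
    · simp
    · simp; omega

lemma pvLoopA_eq (ln : String) (acc l : List String) :
    pvLoopA ln acc l = acc ++ l.takeWhile (fun c => !(c == ln)) := by
  induction l generalizing acc with
  | nil => simp [pvLoopA]
  | cons c rest ih =>
    by_cases h : c = ln
    · simp [pvLoopA, h]
    · simp [pvLoopA, h, ih]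

lemma pv_main (ln : String) (l : List String) :
    (l.reverse.takeWhile (fun c => !(c == ln))).reverse
      = PySem.List.slice l (some (pvF ln l + 1)) none := by
  induction l using List.reverseRecOn with
  | nil =>
    rw [PySem.List.slice_from ([] : List String) (by simp [pvF, PySem.List.enumerate_nil] : (0:Int) ≤ pvF ln [] + 1)]
    simp
  | append_singleton xs x ih =>
    rw [pvF_snoc, List.reverse_append]
    by_cases h : x = ln
    · rw [if_pos h]
      have hlen : ((xs.length : Int) + 1) = ((xs.length + 1 : Nat) : Int) := by push_cast; ring
      rw [hlen, PySem.List.slice_from_natCast]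
      simp [h]
    · rw [if_neg h]
      have hb := pvF_bound ln xs
      have h1 : (0:Int) ≤ pvF ln xs + 1 := by omega
      have h2 : (pvF ln xs + 1).toNat ≤ xs.length := by omega
      have hx : (x == ln) = false := by simp [h]
      rw [PySem.List.slice_from _ h1] at ih ⊢
      simp only [List.reverse_nil, List.nil_append, List.singleton_append,
        List.takeWhile_cons, hx, Bool.not_false, if_true, List.reverse_cons, ih]
      rw [List.drop_append_of_le_length h2]

-- ===== VERDICT (by name: the statement is the Claim_ definition above) =====
theorem find_save_path_spec : Claim_equal_find_save_path := by
  intro path ln _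
  unfold Spec_find_save_path find_save_path find_save_path_alt
  simp only [pvLoopA_eq, List.nil_append, pv_main, pvF]
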